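-- pv_equiv track=rewrite | github.com/balachandran00177-ctrl/monitoring-system | backend/anomaly_detector.py | detect_consecutive_increases
-- ===== SOURCE A (Python) =====
-- def detect_consecutive_increases(data, threshold=3):
--     """
--     Detect consecutive increasing consumption pattern
--
--     Args:
--         data: List of consumption values
--         threshold: Number of consecutive increases to flag
--
--     Returns:
--         Boolean indicating if pattern detected
--     """
--     if len(data) < threshold + 1:
--         return False
--
--     consecutive = 0
--     for i in range(1, len(data)):
--         if data[i] > data[i-1]:
--             consecutive += 1
--             if consecutive >= threshold:
--                 return True
--         else:
--             consecutive = 0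
--
--     return False
-- ===== SOURCE B (Python) =====
-- def detect_consecutive_increases(data, threshold=3):
--     """
--     Detect whether `threshold` consecutive strict increases occur in data.
--
--     Window formulation: build the list of adjacent-increase flags, then
--     report whether some window of `threshold` flags is entirely true.
--     A run of zero (or fewer) increases always exists, so that case is
--     vacuously true.
--     """
--     if threshold <= 0:
--         return True
--     steps = [b > a for a, b in zip(data, data[1:])]
--     return any(all(steps[i:i + threshold])
--                for i in range(len(steps) - threshold + 1))
-- ===== Notes on version B (the rewrite author's own statement) =====
-- stated objective: alternative
-- what changed: B replaces A's streaming counter with early return by an existence check over sliding windows: it builds the list of adjacent strict-increase flags once and asks whether any window of `threshold` flags is all true; for threshold <= 0 it returns the vacuous truth True.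
-- intended difference: For threshold <= 0 on data with no adjacent strict increase, A returns False (its threshold check sits inside the increase branch, so it still demands one increase) while B returns True, the intended vacuous truth that a run of zero increases always exists. — e.g. on detect_consecutive_increases([5], 0): A returns false, B returns true
import Mathlib
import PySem

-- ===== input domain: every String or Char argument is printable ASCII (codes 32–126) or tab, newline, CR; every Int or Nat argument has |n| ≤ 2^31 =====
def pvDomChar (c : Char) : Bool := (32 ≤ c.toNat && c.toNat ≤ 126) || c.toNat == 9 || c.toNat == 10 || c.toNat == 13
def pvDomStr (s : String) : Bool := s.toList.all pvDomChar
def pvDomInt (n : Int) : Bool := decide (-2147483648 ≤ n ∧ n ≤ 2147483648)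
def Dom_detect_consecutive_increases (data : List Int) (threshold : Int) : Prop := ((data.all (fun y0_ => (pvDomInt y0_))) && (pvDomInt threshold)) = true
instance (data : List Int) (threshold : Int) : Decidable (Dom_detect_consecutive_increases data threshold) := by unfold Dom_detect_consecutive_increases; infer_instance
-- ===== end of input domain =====

-- B replaces A's streaming counter + early return by a sliding-window existence check over
-- the list of adjacent-increase flags; for threshold ≤ 0 B returns the vacuous truth True
-- where A still demands one increase (stated as the intended difference D_ below).

-- ===== PORT A =====
-- the 'for i in range(1, len(data))' loop with early 'return True' and counter 'consecutive'
def pvALoop (data : List Int) (threshold : Int) : List Int → Int → Bool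
  | [], _ => false
  | i :: rest, consecutive =>
    if PySem.List.pyGetD data i 0 > PySem.List.pyGetD data (i - 1) 0 then
      if consecutive + 1 ≥ threshold then true
      else pvALoop data threshold rest (consecutive + 1)
    else pvALoop data threshold rest 0

def detect_consecutive_increases (data : List Int) (threshold : Int) : Bool :=
  if (data.length : Int) < threshold + 1 then false
  else pvALoop data threshold (PySem.List.pyRange 1 (data.length : Int) 1) 0

-- ===== PORT B =====
-- 'steps = [b > a for a, b in zip(data, data[1:])]' then any over windows of length threshold
def detect_consecutive_increases_alt (data : List Int) (threshold : Int) : Bool :=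
  if threshold ≤ 0 then true
  else
    let steps := (data.zip (PySem.List.slice data (some 1) none)).map (fun p => decide (p.1 < p.2))
    (PySem.List.pyRange 0 ((steps.length : Int) - threshold + 1) 1).any
      (fun i => (PySem.List.slice steps (some i) (some (i + threshold))).all id)

-- ===== PRECONDITION & SPEC =====
-- For threshold ≤ 0 on data with no adjacent strict increase, A returns False (its threshold
-- check sits inside the increase branch, so it still demands one increase) while B returns
-- True, the intended vacuous truth that a run of zero increases always exists.
def D_detect_consecutive_increases (data : List Int) (threshold : Int) : Prop :=
  threshold ≤ 0 ∧ ∀ p ∈ data.zip data.tail, ¬ p.1 < p.2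
instance (data : List Int) (threshold : Int) : Decidable (D_detect_consecutive_increases data threshold) := by unfold D_detect_consecutive_increases; infer_instance

def Spec_detect_consecutive_increases (data : List Int) (threshold : Int) (out : Bool) : Prop := ¬ D_detect_consecutive_increases data threshold → out = detect_consecutive_increases_alt data threshold
instance (data : List Int) (threshold : Int) (out : Bool) : Decidable (Spec_detect_consecutive_increases data threshold out) := by unfold Spec_detect_consecutive_increases; infer_instance

def pvDiffWitness_detect_consecutive_increases : List Int × Int := ([5], 0)
def pvDiffWitnessOut_detect_consecutive_increases : Bool × Bool := (false, true)

-- ===== CLAIM (what is proved, stated in full; the proofs are below) =====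
def Claim_unchanged_detect_consecutive_increases : Prop := ∀ (data : List Int) (threshold : Int), Dom_detect_consecutive_increases data threshold → Spec_detect_consecutive_increases data threshold (detect_consecutive_increases data threshold)
def Claim_changed_detect_consecutive_increases : Prop := Dom_detect_consecutive_increases (pvDiffWitness_detect_consecutive_increases.1) (pvDiffWitness_detect_consecutive_increases.2) ∧ D_detect_consecutive_increases (pvDiffWitness_detect_consecutive_increases.1) (pvDiffWitness_detect_consecutive_increases.2) ∧ detect_consecutive_increases (pvDiffWitness_detect_consecutive_increases.1) (pvDiffWitness_detect_consecutive_increases.2) = pvDiffWitnessOut_detect_consecutive_increases.1 ∧ detect_consecutive_increases_alt (pvDiffWitness_detect_consecutive_increases.1) (pvDiffWitness_detect_consecutive_increases.2) = pvDiffWitnessOut_detect_consecutive_increases.2 ∧ pvDiffWitnessOut_detect_consecutive_increases.1 ≠ pvDiffWitnessOut_detect_consecutive_increases.2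
def Claim_exact_detect_consecutive_increases : Prop := ∀ (data : List Int) (threshold : Int), Dom_detect_consecutive_increases data threshold → D_detect_consecutive_increases data threshold → detect_consecutive_increases data threshold ≠ detect_consecutive_increases_alt data threshold

-- ===== LEMMAS AND PROOFS =====

-- A's loop rephrased over the list of adjacent pairs (proof-only intermediate form)
def pvAPairs (threshold : Int) : List (Int × Int) → Int → Bool
  | [], _ => false
  | (p, c) :: rest, consecutive =>
    if c > p then
      if consecutive + 1 ≥ threshold then true
      else pvAPairs threshold rest (consecutive + 1)
    else pvAPairs threshold rest 0

-- the adjacent-increase flag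
def pvFl (p : Int × Int) : Bool := decide (p.1 < p.2)

-- "the first t flags are all true" / "some window of t consecutive flags is all true"
def pvAllPref (t : Int) : List Bool → Bool
  | [] => decide (t ≤ 0)
  | f :: r => if t ≤ 0 then true else f && pvAllPref (t - 1) r

def pvExRun (t : Int) : List Bool → Bool
  | [] => false
  | f :: r => pvAllPref t (f :: r) || pvExRun t r

lemma pvALoop_eq_pairs (data : List Int) (t : Int) :
    ∀ (k i : Nat) (c : Int), 1 ≤ i → i + k = data.length →
      pvALoop data t (PySem.List.pyRange (i : Int) (data.length : Int) 1) c
        = pvAPairs t ((data.drop (i - 1)).zip (data.drop i)) c := by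
  intro k
  induction k with
  | zero =>
    intro i c h1 hlen
    have : PySem.List.pyRange (i : Int) (data.length : Int) 1 = [] :=
      PySem.List.pyRange_one_eq_nil (by omega)
    rw [this]
    have : data.drop i = [] := List.drop_eq_nil_of_le (by omega)
    simp [pvALoop, this, pvAPairs]
  | succ k ih =>
    intro i c h1 hlen
    have hilt : i < data.length := by omega
    have hcons : PySem.List.pyRange (i : Int) (data.length : Int) 1
        = (i : Int) :: PySem.List.pyRange ((i : Int) + 1) (data.length : Int) 1 :=
      PySem.List.pyRange_one_cons (by exact_mod_cast hilt)
    have hcast : ((i : Int) + 1) = ((i + 1 : Nat) : Int) := by push_cast; ring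
    have hi1 : i - 1 < data.length := by omega
    have hget : PySem.List.pyGetD data (i : Int) 0 = data[i] := by
      rw [PySem.List.pyGetD_natCast]; exact List.getD_eq_getElem _ _ hilt
    have hgetm : PySem.List.pyGetD data ((i : Int) - 1) 0 = data[i - 1] := by
      have : ((i : Int) - 1) = ((i - 1 : Nat) : Int) := by omega
      rw [this, PySem.List.pyGetD_natCast]; exact List.getD_eq_getElem _ _ hi1
    have hdrop1 : data.drop (i - 1) = data[i - 1] :: data.drop i := by
      have := List.drop_eq_getElem_cons hi1
      simpa [Nat.sub_add_cancel h1] using this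
    have hdrop2 : data.drop i = data[i] :: data.drop (i + 1) :=
      List.drop_eq_getElem_cons hilt
    rw [hcons]
    rw [show (data.drop (i - 1)).zip (data.drop i)
          = (data[i - 1], data[i]) :: ((data.drop i).zip (data.drop (i + 1))) by
        rw [hdrop1, hdrop2]; rfl]
    simp only [pvALoop, pvAPairs, hget, hgetm]
    have hrec := fun c => ih (i + 1) c (by omega) (by omega)
    rw [hcast] at *
    split_ifs with h h2
    · rfl
    · simpa [Nat.add_sub_cancel] using hrec (c + 1)
    · simpa [Nat.add_sub_cancel] using hrec 0

lemma pvAllPref_nonpos (t : Int) (fs : List Bool) (h : t ≤ 0) : pvAllPref t fs = true := by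
  cases fs <;> simp [pvAllPref, h]

lemma pvAllPref_mono : ∀ (fs : List Bool) (a b : Int), a ≤ b →
    pvAllPref b fs = true → pvAllPref a fs = true := by
  intro fs
  induction fs with
  | nil => intro a b hab hb; simp [pvAllPref] at *; omega
  | cons f r ih =>
    intro a b hab hb
    by_cases ha : a ≤ 0
    · simp [pvAllPref, ha]
    · have hbp : ¬ b ≤ 0 := by omega
      simp [pvAllPref, ha, hbp] at *
      exact ⟨hb.1, ih _ _ (by omega) hb.2⟩

lemma pvAllPref_short : ∀ (fs : List Bool) (t : Int), (fs.length : Int) < t →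
    pvAllPref t fs = false := by
  intro fs
  induction fs with
  | nil => intro t ht; simp [pvAllPref]; omega
  | cons f r ih =>
    intro t ht
    simp only [List.length_cons] at ht
    have h0 : ¬ t ≤ 0 := by push_cast at ht; omega
    simp [pvAllPref, h0]
    intro _
    exact ih (t - 1) (by push_cast at ht ⊢; omega)

lemma pvExRun_short : ∀ (fs : List Bool) (t : Int), (fs.length : Int) < t →
    pvExRun t fs = false := by
  intro fs
  induction fs with
  | nil => intro t _; rfl
  | cons f r ih =>
    intro t ht
    simp only [pvExRun, Bool.or_eq_false_iff]
    exact ⟨pvAllPref_short _ _ ht,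
      ih t (by simp only [List.length_cons, Nat.cast_add, Nat.cast_one] at ht; omega)⟩

lemma pvAllPref_absorb (t : Int) (fs : List Bool) (ht : 1 ≤ t) :
    (pvAllPref t fs || pvExRun t fs) = pvExRun t fs := by
  cases fs with
  | nil => simp [pvAllPref, pvExRun]; omega
  | cons f r => simp only [pvExRun, ← Bool.or_assoc, Bool.or_self]

lemma pvAPairs_eq : ∀ (ps : List (Int × Int)) (t c : Int), 1 ≤ t → 0 ≤ c → c < t →
    pvAPairs t ps c = (pvAllPref (t - c) (ps.map pvFl) || pvExRun t (ps.map pvFl)) := by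
  intro ps
  induction ps with
  | nil =>
    intro t c ht hc hct
    simp [pvAPairs, pvExRun, pvAllPref]; omega
  | cons hd tl ih =>
    intro t c ht hc hct
    obtain ⟨p, q⟩ := hd
    have htc : ¬ (t - c ≤ 0) := by omega
    have ht0 : ¬ (t ≤ 0) := by omega
    by_cases h : p < q
    · have hfl : pvFl (p, q) = true := by simp [pvFl, h]
      by_cases h2 : c + 1 ≥ t
      · have : pvAllPref (t - c - 1) (tl.map pvFl) = true := pvAllPref_nonpos _ _ (by omega)
        simp [pvAPairs, h, h2, List.map_cons, pvAllPref, htc, hfl, this, pvExRun]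
      · have hrec := ih t (c + 1) ht (by omega) (by omega)
        simp only [pvAPairs, if_pos (show q > p from h), if_neg h2, hrec,
          List.map_cons, pvExRun, pvAllPref, if_neg htc, if_neg ht0, hfl, Bool.true_and]
        have harith : t - (c + 1) = t - c - 1 := by ring
        rw [harith]
        by_cases hm : pvAllPref (t - 1) (tl.map pvFl) = true
        · have : pvAllPref (t - c - 1) (tl.map pvFl) = true :=
            pvAllPref_mono _ _ _ (by omega) hm
          simp [this, hm]
        · simp only [Bool.not_eq_true] at hm; simp [hm]
    · have hfl : pvFl (p, q) = false := by simp [pvFl, h]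
      have hrec := ih t 0 ht le_rfl (by omega)
      simp only [pvAPairs, if_neg (show ¬ q > p from h), hrec, sub_zero,
        pvAllPref_absorb _ _ ht, List.map_cons, pvExRun, pvAllPref,
        if_neg htc, if_neg ht0, hfl, Bool.false_and, Bool.false_or]

lemma pvAllPref_take : ∀ (fs : List Bool) (tn : Nat), tn ≤ fs.length →
    pvAllPref (tn : Int) fs = (fs.take tn).all id := by
  intro fs
  induction fs with
  | nil =>
    intro tn h
    have h0 : tn = 0 := by simpa using h
    subst h0
    simp [pvAllPref]
  | cons f r ih =>
    intro tn h
    cases tn with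
    | zero => simp [pvAllPref]
    | succ s =>
      have h0 : ¬ ((s + 1 : Nat) : Int) ≤ 0 := by push_cast; omega
      have hc : ((s + 1 : Nat) : Int) - 1 = (s : Int) := by push_cast; ring
      simp only [pvAllPref, if_neg h0, hc, List.take_succ_cons, List.all_cons, id]
      rw [ih s (by simpa using h)]

lemma pvExRun_range : ∀ (fs : List Bool) (tn : Nat), 1 ≤ tn →
    (List.range (fs.length + 1 - tn)).any (fun k => ((fs.drop k).take tn).all id)
      = pvExRun (tn : Int) fs := by
  intro fs
  induction fs with
  | nil =>
    intro tn ht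
    have : 1 - tn = 0 := by omega
    simp [this, pvExRun]
  | cons f r ih =>
    intro tn ht
    by_cases hle : tn ≤ r.length + 1
    · have hN : (f :: r).length + 1 - tn = (r.length + 1 - tn) + 1 := by
        simp only [List.length_cons]; omega
      rw [hN, List.range_succ_eq_map, List.any_cons, List.any_map]
      have htail : (List.range (r.length + 1 - tn)).any
          (fun k => (((f :: r).drop (Nat.succ k)).take tn).all id)
          = pvExRun (tn : Int) r := by
        rw [← ih tn ht]
        exact List.any_congr rfl (fun k => by simp [List.drop_succ_cons])
      have hhead : (((f :: r).drop 0).take tn).all id = pvAllPref (tn : Int) (f :: r) := by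
        rw [List.drop_zero, ← pvAllPref_take _ _ (by simpa using hle)]
      simp only [pvExRun]
      rw [← hhead, ← htail]
      rfl
    · have hN : (f :: r).length + 1 - tn = 0 := by simp only [List.length_cons]; omega
      rw [hN]
      rw [pvExRun_short (f :: r) (tn : Int) (by simp only [List.length_cons, Nat.cast_add, Nat.cast_one]; omega)]
      simp

lemma pvAnyWin (fs : List Bool) (t : Int) (ht : 1 ≤ t) :
    (PySem.List.pyRange 0 ((fs.length : Int) - t + 1) 1).any
      (fun i => (PySem.List.slice fs (some i) (some (i + t))).all id)
    = pvExRun t fs := by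
  obtain ⟨tn, rfl⟩ : ∃ n : Nat, t = (n : Int) := ⟨t.toNat, by omega⟩
  have ht1 : 1 ≤ tn := by exact_mod_cast ht
  rw [PySem.List.pyRange_one]
  have hN : (((fs.length : Int) - (tn : Int) + 1) - 0).toNat = fs.length + 1 - tn := by omega
  rw [hN, List.any_map]
  have : ∀ k : Nat, (PySem.List.slice fs (some ((0 : Int) + (k : Int)))
      (some ((0 : Int) + (k : Int) + (tn : Int)))).all id = ((fs.drop k).take tn).all id := by
    intro k
    rw [zero_add, PySem.List.slice_natCast_add]
  calc (List.range (fs.length + 1 - tn)).any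
        ((fun i => (PySem.List.slice fs (some i) (some (i + (tn : Int)))).all id) ∘
          (fun k : Nat => (0 : Int) + (k : Int)))
      = (List.range (fs.length + 1 - tn)).any (fun k => ((fs.drop k).take tn).all id) :=
        List.any_congr rfl (fun k => this k)
    _ = pvExRun (tn : Int) fs := pvExRun_range fs tn ht1

-- A as the "exists a run" predicate, for positive thresholds
lemma pvA_total (data : List Int) (t : Int) (ht : 1 ≤ t) :
    detect_consecutive_increases data t
      = pvExRun t ((data.zip data.tail).map pvFl) := by
  cases data with
  | nil =>
    have : ((0 : Int) < t + 1) := by omega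
    simp [detect_consecutive_increases, this, pvExRun]
  | cons d ds =>
    set data := d :: ds with hdata
    have hzlen : (data.zip data.tail).length = data.length - 1 := by
      simp [hdata]
    unfold detect_consecutive_increases
    by_cases hg : (data.length : Int) < t + 1
    · rw [if_pos hg]
      symm
      apply pvExRun_short
      rw [List.length_map, hzlen]
      have h1 : 1 ≤ data.length := by simp [hdata]
      push_cast [Nat.cast_sub h1]
      omega
    · rw [if_neg hg]
      have h1 : 1 ≤ data.length := by simp [hdata]
      have hb := pvALoop_eq_pairs data t (data.length - 1) 1 0 le_rfl (by omega)
      have hone : ((1 : Nat) : Int) = (1 : Int) := by norm_num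
      rw [hone] at hb
      rw [hb]
      simp only [Nat.sub_self, List.drop_zero, List.drop_one]
      rw [pvAPairs_eq (data.zip data.tail) t 0 ht le_rfl (by omega), sub_zero]
      exact pvAllPref_absorb _ _ ht

-- B as the same predicate, for positive thresholds
lemma pvB_total (data : List Int) (t : Int) (ht : 1 ≤ t) :
    detect_consecutive_increases_alt data t
      = pvExRun t ((data.zip data.tail).map pvFl) := by
  unfold detect_consecutive_increases_alt
  rw [if_neg (by omega : ¬ t ≤ 0), PySem.List.slice_from_one]
  exact pvAnyWin _ t ht

-- inside D_: A's loop never fires the increase branch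
lemma pvAPairs_false : ∀ (ps : List (Int × Int)) (t c : Int),
    (∀ p ∈ ps, ¬ p.1 < p.2) → pvAPairs t ps c = false := by
  intro ps
  induction ps with
  | nil => intro t c _; rfl
  | cons hd tl ih =>
    intro t c h
    obtain ⟨p, q⟩ := hd
    have hpq : ¬ q > p := h (p, q) List.mem_cons_self
    simp only [pvAPairs, if_neg hpq]
    exact ih t 0 (fun x hx => h x (List.mem_cons_of_mem _ hx))

-- threshold ≤ 0 with some increase present: A's loop returns true at the first increase
lemma pvAPairs_true_of_nonpos : ∀ (ps : List (Int × Int)) (t c : Int), t ≤ 0 → 0 ≤ c →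
    (∃ p ∈ ps, p.1 < p.2) → pvAPairs t ps c = true := by
  intro ps
  induction ps with
  | nil => intro t c _ _ h; simp at h
  | cons hd tl ih =>
    intro t c ht hc h
    obtain ⟨p, q⟩ := hd
    by_cases hpq : p < q
    · simp [pvAPairs, hpq, show c + 1 ≥ t by omega]
    · have : ∃ x ∈ tl, x.1 < x.2 := by
        rcases h with ⟨x, hx, hlt⟩
        rcases List.mem_cons.mp hx with rfl | hx'
        · exact absurd hlt hpq
        · exact ⟨x, hx', hlt⟩
      simp only [pvAPairs, if_neg (show ¬ q > p from hpq)]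
      exact ih t 0 ht le_rfl this

-- A = false on all of D_
lemma pvA_false_of_D (data : List Int) (t : Int)
    (h : ∀ p ∈ data.zip data.tail, ¬ p.1 < p.2) :
    detect_consecutive_increases data t = false := by
  cases data with
  | nil =>
    unfold detect_consecutive_increases
    by_cases hg : ((0 : Int) < t + 1)
    · simp [hg]
    · rw [if_neg (by simpa using hg)]
      rw [show PySem.List.pyRange 1 ((List.length ([] : List Int)) : Int) 1 = [] from
        PySem.List.pyRange_one_eq_nil (by simp)]
      rfl
  | cons d ds =>
    set data := d :: ds with hdata
    unfold detect_consecutive_increases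
    by_cases hg : ((data.length : Int) < t + 1)
    · rw [if_pos hg]
    · rw [if_neg hg]
      have h1 : 1 ≤ data.length := by simp [hdata]
      have hb := pvALoop_eq_pairs data t (data.length - 1) 1 0 le_rfl (by omega)
      have hone : ((1 : Nat) : Int) = (1 : Int) := by norm_num
      rw [hone] at hb
      rw [hb]
      simp only [Nat.sub_self, List.drop_zero, List.drop_one]
      exact pvAPairs_false _ t 0 h

-- ===== VERDICT (by name: the statements are the Claim_ definitions above) =====
theorem detect_consecutive_increases_spec : Claim_unchanged_detect_consecutive_increases := by
  intro data t _
  unfold Spec_detect_consecutive_increases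
  intro hnD
  by_cases ht : 1 ≤ t
  · rw [pvA_total data t ht, pvB_total data t ht]
  · have ht0 : t ≤ 0 := by omega
    have hex : ∃ p ∈ data.zip data.tail, p.1 < p.2 := by
      unfold D_detect_consecutive_increases at hnD
      push Not at hnD
      exact hnD ht0
    have hB : detect_consecutive_increases_alt data t = true := by
      unfold detect_consecutive_increases_alt
      rw [if_pos ht0]
    rw [hB]
    rcases hex with ⟨p, hp, hlt⟩
    have hlen2 : 2 ≤ data.length := by
      rcases data with _ | ⟨d, _ | ⟨e, ds⟩⟩ <;> simp_all
    unfold detect_consecutive_increases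
    rw [if_neg (by omega)]
    have hb := pvALoop_eq_pairs data t (data.length - 1) 1 0 le_rfl (by omega)
    have hone : ((1 : Nat) : Int) = (1 : Int) := by norm_num
    rw [hone] at hb
    rw [hb]
    simp only [Nat.sub_self, List.drop_zero, List.drop_one]
    exact pvAPairs_true_of_nonpos _ t 0 ht0 le_rfl ⟨p, hp, hlt⟩

theorem detect_consecutive_increases_changed : Claim_changed_detect_consecutive_increases := by
  unfold Claim_changed_detect_consecutive_increases; decide

theorem detect_consecutive_increases_tight : Claim_exact_detect_consecutive_increases := by
  intro data t _ hD
  obtain ⟨ht, hall⟩ := hD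
  have hB : detect_consecutive_increases_alt data t = true := by
    unfold detect_consecutive_increases_alt
    rw [if_pos ht]
  rw [hB, pvA_false_of_D data t hall]
  simp
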